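-- pv_equiv track=rewrite | github.com/AldyPy/Tugas-Besar-TBFO | Input_Handling/PDAconfig.py | getFiveWords
-- ===== SOURCE A (Python) =====
-- def getFiveWords(line):
--
--     count = 0
--     current_word = ""
--     words = ["" for i in range(5)]
--     for i in line:
--
--         if i == " " and count < 4:
--             words[count] = current_word
--             count += 1
--             current_word = ""
--
--         elif count == 4:
--             if i != "\n":
--                 words[4] += i
--
--         else:
--             current_word += i
--
--     return words
-- ===== SOURCE B (Python) =====
-- def getFiveWords(line):
--     # Peel off up to four space-terminated words from the front, then the
--     # remainder (newlines removed) is field 4; pad with "" to five entries.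
--     words = []
--     rest = line
--     while len(words) < 4 and " " in rest:
--         head, rest = rest.split(" ", 1)
--         words.append(head)
--     if len(words) == 4:
--         words.append(rest.replace("\n", ""))
--     words += [""] * (5 - len(words))
--     return words
-- ===== Notes on version B (the rewrite author's own statement) =====
-- stated objective: faster
-- what changed: Replaces the character-by-character state machine (count, current_word, in-place list writes) by peeling up to four space-terminated words off the front with single splits, then taking the remainder with newlines removed as field 4 and padding with empty strings.
import Mathlib
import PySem

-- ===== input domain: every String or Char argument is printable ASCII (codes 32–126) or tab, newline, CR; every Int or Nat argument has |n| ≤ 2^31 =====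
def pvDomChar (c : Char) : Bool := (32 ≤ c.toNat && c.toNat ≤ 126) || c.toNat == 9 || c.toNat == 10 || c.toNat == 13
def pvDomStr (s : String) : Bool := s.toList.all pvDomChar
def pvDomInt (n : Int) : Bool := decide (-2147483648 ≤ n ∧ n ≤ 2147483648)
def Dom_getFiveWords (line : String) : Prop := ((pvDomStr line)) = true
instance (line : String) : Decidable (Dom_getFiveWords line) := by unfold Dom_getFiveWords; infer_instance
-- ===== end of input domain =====

-- B replaces A's per-character state machine by peeling words off with split(" ", 1); objective: it is shorter and measurably faster (C-level str.split instead of a Python per-character loop).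

-- ===== PORT A =====
-- the for-loop over the characters, state = (count, current_word, words);
-- words[count] = w is List.set, words[4] is getD (count=4 implies index 4 exists, list has length 5)
def pvGoA : List Char → Nat → List Char → List (List Char) → List (List Char)
  | [], _, _, ws => ws
  | c :: cs, count, cur, ws =>
    if c = ' ' ∧ count < 4 then
      pvGoA cs (count + 1) [] (ws.set count cur)
    else if count = 4 then
      if c ≠ '\n' then pvGoA cs count cur (ws.set 4 (ws.getD 4 [] ++ [c]))
      else pvGoA cs count cur ws
    else
      pvGoA cs count (cur ++ [c]) ws

def getFiveWords (line : String) : List String :=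
  (pvGoA line.toList 0 [] (List.replicate 5 [])).map (fun w => String.ofList w)

-- ===== PORT B =====
-- the while loop: head, rest = rest.split(" ", 1) is exactly (takeWhile (≠ ' '), tail of dropWhile)
-- when " " in rest; words.append(head)
def pvGoB (rest : List Char) (words : List (List Char)) : List (List Char) × List Char :=
  if h : words.length < 4 ∧ ' ' ∈ rest then
    pvGoB ((rest.dropWhile (· ≠ ' ')).tail) (words ++ [rest.takeWhile (· ≠ ' ')])
  else (words, rest)
termination_by rest.length
decreasing_by
  have hne : rest.dropWhile (· ≠ ' ') ≠ [] := by
    intro hnil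
    have := (List.dropWhile_eq_nil_iff).mp hnil ' ' h.2
    simp at this
  have h1 : (rest.dropWhile (· ≠ ' ')).length ≤ rest.length := rest.length_dropWhile_le _
  have h2 : 0 < (rest.dropWhile (· ≠ ' ')).length := List.length_pos_iff.mpr hne
  simp only [List.length_tail, ne_eq, decide_not] at *
  omega

-- rest.replace("\n","") is exactly filter (≠ '\n'); the final pad words += [""]*(5-len(words))
def pvFinishB (ws : List (List Char)) (rest : List Char) : List (List Char) :=
  let ws2 := if ws.length = 4 then ws ++ [rest.filter (· ≠ '\n')] else ws
  ws2 ++ List.replicate (5 - ws2.length) []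

def getFiveWords_alt (line : String) : List String :=
  let p := pvGoB line.toList []
  (pvFinishB p.1 p.2).map (fun w => String.ofList w)

-- ===== PRECONDITION & SPEC =====
def Spec_getFiveWords (line : String) (out : List String) : Prop := out = getFiveWords_alt line
instance (line : String) (out : List String) : Decidable (Spec_getFiveWords line out) := by unfold Spec_getFiveWords; infer_instance

-- ===== CLAIM (what is proved, stated in full; the proofs are below) =====
def Claim_equal_getFiveWords : Prop := ∀ (line : String), Dom_getFiveWords line → Spec_getFiveWords line (getFiveWords line)

-- ===== LEMMAS AND PROOFS =====

theorem pvSet_append_len {α : Type} (wb : List α) (x : α) (xs : List α) (v : α) :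
    (wb ++ x :: xs).set wb.length v = wb ++ v :: xs := by
  induction wb with
  | nil => simp
  | cons a t ih => simp [ih]

theorem pvGetD_append_len {α : Type} (wb : List α) (x : α) (xs : List α) (d : α) :
    (wb ++ x :: xs)[wb.length]?.getD d = x := by
  induction wb with
  | nil => simp
  | cons a t ih => simpa using ih

-- no space, count < 4: the trailing word is dropped, words unchanged
theorem pvGoA_no_space (cs : List Char) : ∀ (count : Nat) (cur : List Char) (ws : List (List Char)),
    count < 4 → ' ' ∉ cs → pvGoA cs count cur ws = ws := by
  induction cs with
  | nil => intro _ _ _ _ _; rfl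
  | cons c cs ih =>
    intro count cur ws hc h
    have hc' : c ≠ ' ' := fun hch => h (hch ▸ List.mem_cons_self)
    have h4 : count ≠ 4 := by omega
    simp only [pvGoA, hc', false_and, if_false, h4, ite_false]
    exact ih count (cur ++ [c]) ws hc (fun hm => h (List.mem_cons_of_mem _ hm))

-- count = 4: every remaining non-newline character is appended to field 4
theorem pvGoA_four (cs : List Char) : ∀ (cur w4 : List Char) (wb : List (List Char)),
    wb.length = 4 → pvGoA cs 4 cur (wb ++ [w4]) = wb ++ [w4 ++ cs.filter (· ≠ '\n')] := by
  induction cs with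
  | nil => intro cur w4 wb hw; simp [pvGoA]
  | cons c cs ih =>
    intro cur w4 wb hw
    by_cases hn : c = '\n'
    · subst hn
      simp only [pvGoA]
      norm_num
      rw [ih cur w4 wb hw]
      simp
    · simp only [pvGoA]
      norm_num [hn]
      rw [show (4 : Nat) = wb.length from hw.symm, pvGetD_append_len, pvSet_append_len, hw,
        ih cur (w4 ++ [c]) wb hw]
      simp [hn]

-- count < 4 and a space ahead: A consumes exactly one space-terminated word
theorem pvGoA_step (cs : List Char) : ∀ (count : Nat) (cur : List Char) (ws : List (List Char)),
    count < 4 → ' ' ∈ cs →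
    pvGoA cs count cur ws =
      pvGoA ((cs.dropWhile (· ≠ ' ')).tail) (count + 1) []
        (ws.set count (cur ++ cs.takeWhile (· ≠ ' '))) := by
  induction cs with
  | nil => intro _ _ _ _ h; simp at h
  | cons c cs ih =>
    intro count cur ws hc h
    by_cases hsp : c = ' '
    · subst hsp
      simp [pvGoA, hc, List.dropWhile, List.takeWhile]
    · have h4 : count ≠ 4 := by omega
      have hm : ' ' ∈ cs := by
        cases List.mem_cons.mp h with
        | inl he => exact absurd he.symm hsp
        | inr hmem => exact hmem
      simp only [pvGoA, hsp, false_and, if_false, h4, ite_false]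
      rw [ih count (cur ++ [c]) ws hc hm]
      simp [List.dropWhile, List.takeWhile, hsp]

-- main invariant: A's fold from a boundary state equals B's word-peeling loop plus finish
theorem pvMain (n : Nat) : ∀ (rest : List Char) (wb : List (List Char)),
    rest.length ≤ n → wb.length ≤ 4 →
    pvGoA rest wb.length [] (wb ++ List.replicate (5 - wb.length) []) =
      pvFinishB (pvGoB rest wb).1 (pvGoB rest wb).2 := by
  induction n with
  | zero =>
    intro rest wb hlen hwb
    have hrest : rest = [] := List.length_eq_zero_iff.mp (Nat.le_zero.mp hlen)
    subst hrest
    rw [pvGoB.eq_def]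
    have hno : ¬ (wb.length < 4 ∧ ' ' ∈ ([] : List Char)) := by simp
    rw [dif_neg hno]
    by_cases h4 : wb.length = 4
    · rw [show 5 - wb.length = 1 by omega]
      simp only [List.replicate]
      rw [show wb.length = 4 from h4, pvGoA_four [] [] [] wb h4]
      simp [pvFinishB, h4]
    · simp [pvGoA, pvFinishB, h4]
  | succ n ih =>
    intro rest wb hlen hwb
    by_cases hcond : wb.length < 4 ∧ ' ' ∈ rest
    · rw [pvGoB.eq_def, dif_pos hcond]
      rw [pvGoA_step rest wb.length [] _ hcond.1 hcond.2]
      have hrep : List.replicate (5 - wb.length) ([] : List Char) =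
          [] :: List.replicate (5 - (wb.length + 1)) [] := by
        rw [show 5 - wb.length = (5 - (wb.length + 1)) + 1 by omega]
        simp [List.replicate_succ]
      rw [hrep, pvSet_append_len]
      have hset : wb ++ ([] ++ rest.takeWhile (· ≠ ' ')) :: List.replicate (5 - (wb.length + 1)) ([] : List Char) =
          (wb ++ [rest.takeWhile (· ≠ ' ')]) ++ List.replicate (5 - (wb ++ [rest.takeWhile (· ≠ ' ')]).length) [] := by
        simp
      rw [hset, show wb.length + 1 = (wb ++ [rest.takeWhile (· ≠ ' ')]).length by simp]
      apply ih
      · have hne : rest.dropWhile (· ≠ ' ') ≠ [] := by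
          intro hnil
          have := (List.dropWhile_eq_nil_iff).mp hnil ' ' hcond.2
          simp at this
        have h1 : (rest.dropWhile (· ≠ ' ')).length ≤ rest.length := rest.length_dropWhile_le _
        have h2 : 0 < (rest.dropWhile (· ≠ ' ')).length := List.length_pos_iff.mpr hne
        simp only [List.length_tail]
        omega
      · simp
        omega
    · rw [pvGoB.eq_def, dif_neg hcond]
      by_cases h4 : wb.length = 4
      · rw [show 5 - wb.length = 1 by omega]
        simp only [List.replicate]
        rw [show wb.length = 4 from h4, pvGoA_four rest [] [] wb h4]
        simp [pvFinishB, h4]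
      · have hlt : wb.length < 4 := by omega
        have hns : ' ' ∉ rest := fun hm => hcond ⟨hlt, hm⟩
        rw [pvGoA_no_space rest wb.length [] _ hlt hns]
        simp [pvFinishB, h4]

-- ===== VERDICT (by name: the statement is the Claim_ definition above) =====
theorem getFiveWords_spec : Claim_equal_getFiveWords := by
  intro line _
  unfold Spec_getFiveWords getFiveWords getFiveWords_alt
  have h := pvMain line.toList.length line.toList [] le_rfl (by simp)
  simpa using congrArg (List.map (fun w => String.ofList w)) h
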